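-- pv_equiv track=rewrite | github.com/pypi-data/pypi-mirror-385 | packages/assertlang/assertlang-0.0.4-py3-none-any.whl/language/rust_parser_v2.py | _extract_rust_block_body
-- ===== SOURCE A (Python) =====
-- from typing import List, Dict, Optional, Any, Set, Tuple
--
-- def _extract_rust_block_body(lines: List[str], start_index: int) -> tuple[str, int]:
--     """
--     Extract the body of a block starting from line with opening '{'.
--     Returns (body_text, lines_consumed).
--     """
--     # Reconstruct source from lines
--     source = '\n'.join(lines[start_index:])
--
--     # Find opening brace
--     brace_idx = source.find('{')
--     if brace_idx == -1:
--         return "", 0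
--
--     # Track brace depth
--     depth = 0
--     i = brace_idx
--
--     while i < len(source):
--         if source[i] == '{':
--             depth += 1
--         elif source[i] == '}':
--             depth -= 1
--             if depth == 0:
--                 # Extract body (between braces)
--                 body = source[brace_idx + 1:i]
--
--                 # Count lines consumed
--                 consumed_text = source[:i + 1]
--                 lines_consumed = consumed_text.count('\n') + 1
--
--                 return body.strip(), lines_consumed
--         i += 1
--
--     # Unclosed block - return what we have
--     return source[brace_idx + 1:].strip(), len(lines) - start_index
-- ===== SOURCE B (Python) =====
-- from typing import List
--
-- def _extract_rust_block_body(lines: List[str], start_index: int) -> tuple[str, int]: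
--     """Line-by-line scan: locate the line holding the first '{', then walk
--     subsequent fragments keeping brace depth, without joining the source first."""
--     rest = lines[start_index:]
--     # find the first line containing '{', collecting the lines before it
--     before = []
--     col = -1
--     l = ""
--     for l in rest:
--         col = l.find('{')
--         if col != -1:
--             break
--         before.append(l)
--     if col == -1:
--         return "", 0
--     # newlines in the source before the opening brace
--     nl_before = 0
--     for b in before:
--         nl_before += b.count('\n') + 1
--     nl_before += l[:col].count('\n')
--     # scan fragments after the brace, keeping depth
--     depth = 1
--     frags = []
--     segs = [l[col + 1:]] + rest[len(before) + 1:]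
--     for seg in segs:
--         pre = []
--         for c in seg:
--             if c == '{':
--                 depth += 1
--             elif c == '}':
--                 depth -= 1
--                 if depth == 0:
--                     raw = '\n'.join(frags + [''.join(pre)])
--                     return raw.strip(), nl_before + raw.count('\n') + 1
--             pre.append(c)
--         frags.append(seg)
--     raw = '\n'.join(frags)
--     return raw.strip(), len(lines) - start_index
-- ===== Notes on version B (the rewrite author's own statement) =====
-- stated objective: alternative
-- what changed: B replaces A's join-all-lines-then-index-scan with a per-line decomposition: it first locates the line (and column) holding the opening brace, then scans subsequent line fragments keeping brace depth, accumulating fragments and a running newline count, never materialising the joined source string or slicing it.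
import Mathlib
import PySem

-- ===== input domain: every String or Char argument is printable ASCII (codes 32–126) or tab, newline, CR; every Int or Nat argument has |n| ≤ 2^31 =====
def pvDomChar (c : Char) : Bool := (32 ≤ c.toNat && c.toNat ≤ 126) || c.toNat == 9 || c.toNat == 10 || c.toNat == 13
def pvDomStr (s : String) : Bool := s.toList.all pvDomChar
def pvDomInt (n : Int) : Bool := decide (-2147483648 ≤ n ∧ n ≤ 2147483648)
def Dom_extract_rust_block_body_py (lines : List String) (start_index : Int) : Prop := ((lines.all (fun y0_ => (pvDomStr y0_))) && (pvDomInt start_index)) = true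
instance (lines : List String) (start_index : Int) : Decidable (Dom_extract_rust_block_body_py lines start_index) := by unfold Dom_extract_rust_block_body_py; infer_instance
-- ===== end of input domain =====

-- B re-implements A by a per-line scan (find the line holding the first '{', then walk line
-- fragments keeping brace depth) instead of joining all lines into one string and index-scanning it;
-- objective: alternative decomposition, same exact return value.

-- ===== PORT A =====
-- the while loop of A: scans src from index i keeping depth; returns the index of the
-- closing brace (the `return` inside the loop) or none (the loop runs off the end)
def pvLoopA (src : List Char) (depth : Int) (i : Nat) : Option Nat :=
  if h : i < src.length then
    if src[i] = '{' then pvLoopA src (depth + 1) (i + 1)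
    else if src[i] = '}' then
      if depth - 1 = 0 then some i
      else pvLoopA src (depth - 1) (i + 1)
    else pvLoopA src depth (i + 1)
  else none
termination_by src.length - i

def extract_rust_block_body_py (lines : List String) (start_index : Int) : String × Int :=
  let source := PySem.Str.join "\n" (PySem.List.slice lines (some start_index) none)
  let src := source.toList
  let brace_idx : Int := PySem.Str.find source "{"
  if brace_idx = -1 then ("", 0)
  else
    -- here brace_idx ≥ 0 (str.find is ≥ -1), so .toNat is the found index
    match pvLoopA src 0 brace_idx.toNat with
    | some i =>
        (String.ofList (PySem.Chars.strip (PySem.Chars.slice src (some (brace_idx + 1)) (some (i : Int)))),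
         ((PySem.Chars.count (PySem.Chars.slice src none (some ((i : Int) + 1))) ['\n'] : Int) + 1))
    | none =>
        (String.ofList (PySem.Chars.strip (PySem.Chars.slice src (some (brace_idx + 1)) none)),
         (lines.length : Int) - start_index)

-- ===== PORT B =====
-- Source B's first loop: walk the lines, collecting those before the first line containing '{';
-- returns none if no line contains '{', else (lines before, that line, its find result)
def pvFindOpen : List String → Option (List String × String × Int)
  | [] => none
  | l :: ls =>
    let col := PySem.Str.find l "{"
    if col = -1 then (pvFindOpen ls).map (fun r => (l :: r.1, r.2.1, r.2.2))
    else some ([], l, col)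

-- Source B's inner `for c in seg` loop: either the closing brace is in this fragment
-- (some prefix-before-it) or it is not (none, and the depth after the fragment)
def pvScanSeg : List Char → Int → Option (List Char) × Int
  | [], d => (none, d)
  | c :: cs, d =>
    if c = '{' then
      let r := pvScanSeg cs (d + 1); (r.1.map (c :: ·), r.2)
    else if c = '}' then
      if d - 1 = 0 then (some [], 0)
      else let r := pvScanSeg cs (d - 1); (r.1.map (c :: ·), r.2)
    else
      let r := pvScanSeg cs d; (r.1.map (c :: ·), r.2)

-- Source B's outer `for seg in segs` loop with the `frags` accumulator;
-- Bool = closed (returned inside the loop) vs fell through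
def pvScanSegs : List (List Char) → Int → List (List Char) → List (List Char) × Bool
  | [], _, frags => (frags, false)
  | seg :: restSegs, d, frags =>
    match pvScanSeg seg d with
    | (some pre, _) => (frags ++ [pre], true)
    | (none, d') => pvScanSegs restSegs d' (frags ++ [seg])

def extract_rust_block_body_py_alt (lines : List String) (start_index : Int) : String × Int :=
  let rest := PySem.List.slice lines (some start_index) none
  match pvFindOpen rest with
  | none => ("", 0)
  | some (before, l, col) =>
    let nl0 : Int := before.foldl (fun a b => a + (PySem.Str.count b "\n" : Int) + 1) 0
    let nl_before : Int := nl0 + (PySem.Chars.count (PySem.Chars.slice l.toList none (some col)) ['\n'] : Int)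
    let segs : List (List Char) :=
      PySem.Chars.slice l.toList (some (col + 1)) none
        :: (PySem.List.slice rest (some ((before.length : Int) + 1)) none).map String.toList
    let res := pvScanSegs segs 1 []
    let raw := PySem.Chars.join ['\n'] res.1
    if res.2 then
      (String.ofList (PySem.Chars.strip raw), nl_before + (PySem.Chars.count raw ['\n'] : Int) + 1)
    else
      (String.ofList (PySem.Chars.strip raw), (lines.length : Int) - start_index)

-- ===== PRECONDITION & SPEC =====
def Spec_extract_rust_block_body_py (lines : List String) (start_index : Int) (out : String × Int) : Prop := out = extract_rust_block_body_py_alt lines start_index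
instance (lines : List String) (start_index : Int) (out : String × Int) : Decidable (Spec_extract_rust_block_body_py lines start_index out) := by unfold Spec_extract_rust_block_body_py; infer_instance

-- ===== CLAIM (what is proved, stated in full; the proofs are below) =====
def Claim_equal_extract_rust_block_body_py : Prop := ∀ (lines : List String) (start_index : Int), Dom_extract_rust_block_body_py lines start_index → Spec_extract_rust_block_body_py lines start_index (extract_rust_block_body_py lines start_index)

-- ===== LEMMAS AND PROOFS =====

-- the common reference value both ports are reduced to, phrased on the joined char list
def pvRef (S : List Char) (u : Int) : String × Int :=
  let n := PySem.Chars.find S ['{']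
  if n = -1 then ("", 0)
  else
    match (pvScanSeg (S.drop (n.toNat + 1)) 1).1 with
    | some pre =>
        (String.ofList (PySem.Chars.strip pre),
         ((S.take n.toNat).count '\n' : Int) + (pre.count '\n' : Int) + 1)
    | none => (String.ofList (PySem.Chars.strip (S.drop (n.toNat + 1))), u)

theorem pv_go_step (c a : Char) (t : List Char) (f acc : Nat) :
    PySem.Chars.count.go [c] (f+1) (a::t) acc =
      if [c].isPrefixOf (a::t) = true then PySem.Chars.count.go [c] f (List.drop [c].length (a::t)) (acc + 1)
      else PySem.Chars.count.go [c] f t acc := rfl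

theorem pv_count_go_char (c : Char) : ∀ (s : List Char) (fuel acc : Nat), s.length ≤ fuel →
    PySem.Chars.count.go [c] fuel s acc = acc + s.count c := by
  intro s
  induction s with
  | nil => intro fuel acc h; cases fuel <;> simp [PySem.Chars.count.go]
  | cons a t ih =>
    intro fuel acc h
    cases fuel with
    | zero => simp at h
    | succ f =>
      rw [pv_go_step]
      simp only [List.length_cons] at h
      by_cases hc : c = a
      · subst hc
        rw [if_pos (by simp [List.isPrefixOf_iff_prefix, List.cons_prefix_cons])]
        have hd : List.drop [c].length (c :: t) = t := by simp
        rw [hd, ih f (acc + 1) (by omega)]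
        simp [List.count_cons]
        omega
      · rw [if_neg (by simp [List.isPrefixOf_iff_prefix, List.cons_prefix_cons, hc])]
        rw [ih f acc (by omega)]
        simp [List.count_cons, beq_iff_eq, Ne.symm hc]

theorem pv_count_char (s : List Char) (c : Char) : PySem.Chars.count s [c] = s.count c := by
  simp [PySem.Chars.count, pv_count_go_char c s s.length 0 (le_refl _)]

theorem pv_single_pre {S : List Char} {c : Char} {i : Nat} (h : i < S.length) :
    ([c] <+: S.drop i) ↔ S[i] = c := by
  rw [List.drop_eq_getElem_cons h]
  constructor
  · rintro ⟨t, ht⟩; rw [List.cons_append] at ht; exact (List.cons.injEq _ _ _ _ ▸ ht).1.symm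
  · intro h'; exact ⟨S.drop (i+1), by simp [h']⟩

theorem pv_find_char_eq {S : List Char} {c : Char} {j : Nat} (hj : j < S.length)
    (h1 : S[j] = c) (h2 : ∀ i, i < j → ∀ (hi : i < S.length), S[i] ≠ c) :
    PySem.Chars.find S [c] = j := by
  have hpre : [c] <+: S.drop j := (pv_single_pre hj).2 h1
  have hinf : [c] <:+: S := hpre.isInfix.trans (List.drop_suffix j S).isInfix
  have h0 : 0 ≤ PySem.Chars.find S [c] := (PySem.Chars.find_nonneg_iff S [c]).2 hinf
  obtain ⟨hp, hmin⟩ := PySem.Chars.find_spec h0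
  set k := (PySem.Chars.find S [c]).toNat with hk
  have hkl : k < S.length := by
    by_contra hge
    rw [List.drop_eq_nil_of_le (by omega)] at hp
    simp at hp
  rcases lt_trichotomy k j with hlt | heq | hgt
  · exact absurd ((pv_single_pre hkl).1 hp) (h2 k hlt hkl)
  · have : PySem.Chars.find S [c] = (j : Int) := by omega
    exact this
  · exact absurd hpre (hmin j hgt)

theorem pv_find_char_notmem {S : List Char} {c : Char} (h : c ∉ S) :
    PySem.Chars.find S [c] = -1 := by
  rw [PySem.Chars.find_eq_neg_one_iff]
  intro hinf
  exact h (hinf.mem (by simp))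

theorem pvScanSeg_cons_open (cs : List Char) (d : Int) :
    pvScanSeg ('{'::cs) d = ((pvScanSeg cs (d+1)).1.map ('{' :: ·), (pvScanSeg cs (d+1)).2) := by
  simp [pvScanSeg]

theorem pvScanSeg_cons_close (cs : List Char) (d : Int) :
    pvScanSeg ('}'::cs) d =
      if d - 1 = 0 then (some [], 0)
      else ((pvScanSeg cs (d-1)).1.map ('}' :: ·), (pvScanSeg cs (d-1)).2) := by
  by_cases h3 : d - 1 = 0 <;> simp [pvScanSeg, h3]

theorem pvScanSeg_cons_other {c : Char} (h1 : c ≠ '{') (h2 : c ≠ '}') (cs : List Char) (d : Int) :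
    pvScanSeg (c::cs) d = ((pvScanSeg cs d).1.map (c :: ·), (pvScanSeg cs d).2) := by
  simp [pvScanSeg, h1, h2]

theorem pv_scanSeg_found : ∀ (t : List Char) (d : Int) (pre : List Char),
    (pvScanSeg t d).1 = some pre → ∃ r, t = pre ++ '}' :: r := by
  intro t
  induction t with
  | nil => intro d pre h; simp [pvScanSeg] at h
  | cons c cs ih =>
    intro d pre h
    by_cases h1 : c = '{'
    · subst h1
      rw [pvScanSeg_cons_open] at h
      simp only [Option.map_eq_some_iff] at h
      obtain ⟨p, hp, rfl⟩ := h
      obtain ⟨r, hr⟩ := ih _ _ hp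
      exact ⟨r, by simp [hr]⟩
    · by_cases h2 : c = '}'
      · subst h2
        rw [pvScanSeg_cons_close] at h
        by_cases h3 : d - 1 = 0
        · rw [if_pos h3] at h
          simp at h
          subst h
          exact ⟨cs, rfl⟩
        · rw [if_neg h3] at h
          simp only [Option.map_eq_some_iff] at h
          obtain ⟨p, hp, rfl⟩ := h
          obtain ⟨r, hr⟩ := ih _ _ hp
          exact ⟨r, by simp [hr]⟩
      · rw [pvScanSeg_cons_other h1 h2] at h
        simp only [Option.map_eq_some_iff] at h
        obtain ⟨p, hp, rfl⟩ := h
        obtain ⟨r, hr⟩ := ih _ _ hp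
        exact ⟨r, by simp [hr]⟩

theorem pv_scanSeg_append : ∀ (xs ys : List Char) (d : Int),
    pvScanSeg (xs ++ ys) d =
      match pvScanSeg xs d with
      | (some pre, d') => (some pre, d')
      | (none, d') => ((pvScanSeg ys d').1.map (xs ++ ·), (pvScanSeg ys d').2) := by
  intro xs
  induction xs with
  | nil => intro ys d; simp [pvScanSeg]
  | cons c cs ih =>
    intro ys d
    by_cases h1 : c = '{'
    · subst h1
      rw [List.cons_append, pvScanSeg_cons_open, pvScanSeg_cons_open, ih]
      rcases hs : pvScanSeg cs (d + 1) with ⟨o, d'⟩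
      cases o <;> simp [Option.map_map, Function.comp_def]
    · by_cases h2 : c = '}'
      · subst h2
        rw [List.cons_append, pvScanSeg_cons_close, pvScanSeg_cons_close]
        by_cases h3 : d - 1 = 0
        · simp [h3]
        · rw [if_neg h3, if_neg h3, ih]
          rcases hs : pvScanSeg cs (d - 1) with ⟨o, d'⟩
          cases o <;> simp [Option.map_map, Function.comp_def]
      · rw [List.cons_append, pvScanSeg_cons_other h1 h2, pvScanSeg_cons_other h1 h2, ih]
        rcases hs : pvScanSeg cs d with ⟨o, d'⟩
        cases o <;> simp [Option.map_map, Function.comp_def]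

theorem pv_loopA_aux (S : List Char) : ∀ (n i : Nat) (d : Int), S.length - i ≤ n →
    pvLoopA S d i = (pvScanSeg (S.drop i) d).1.map (fun pre => i + pre.length) := by
  intro n
  induction n with
  | zero =>
    intro i d h
    have hi : ¬ i < S.length := by omega
    rw [pvLoopA, dif_neg hi, List.drop_eq_nil_of_le (by omega)]
    simp [pvScanSeg]
  | succ n ihn =>
    intro i d h
    by_cases hi : i < S.length
    · rw [pvLoopA, dif_pos hi, List.drop_eq_getElem_cons hi]
      by_cases h1 : S[i] = '{'
      · rw [if_pos h1, ihn (i+1) (d+1) (by omega), h1, pvScanSeg_cons_open]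
        cases (pvScanSeg (S.drop (i+1)) (d+1)).1 <;> simp <;> omega
      · by_cases h2 : S[i] = '}'
        · rw [if_neg h1, if_pos h2, h2, pvScanSeg_cons_close]
          by_cases h3 : d - 1 = 0
          · rw [if_pos h3, if_pos h3]
            simp
          · rw [if_neg h3, if_neg h3, ihn (i+1) (d-1) (by omega)]
            cases (pvScanSeg (S.drop (i+1)) (d-1)).1 <;> simp <;> omega
        · rw [if_neg h1, if_neg h2, ihn (i+1) d (by omega), pvScanSeg_cons_other h1 h2]
          cases (pvScanSeg (S.drop (i+1)) d).1 <;> simp <;> omega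
    · rw [pvLoopA, dif_neg hi, List.drop_eq_nil_of_le (by omega)]
      simp [pvScanSeg]

theorem pv_loopA_eq (S : List Char) (i : Nat) (d : Int) :
    pvLoopA S d i = (pvScanSeg (S.drop i) d).1.map (fun pre => i + pre.length) :=
  pv_loopA_aux S (S.length - i) i d (le_refl _)

theorem pv_J_single (x : List Char) : PySem.Chars.join ['\n'] [x] = x := by
  simp [PySem.Chars.join, List.intercalate]

theorem pv_J_cons (x : List Char) {ys : List (List Char)} (h : ys ≠ []) :
    PySem.Chars.join ['\n'] (x :: ys) = x ++ '\n' :: PySem.Chars.join ['\n'] ys := by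
  obtain ⟨y, t, rfl⟩ := List.exists_cons_of_ne_nil h
  simp [PySem.Chars.join, List.intercalate]

theorem pv_J_decomp (before : List (List Char)) {lrest : List (List Char)} (h : lrest ≠ []) :
    PySem.Chars.join ['\n'] (before ++ lrest) =
      (before.map (· ++ ['\n'])).flatten ++ PySem.Chars.join ['\n'] lrest := by
  induction before with
  | nil => simp
  | cons b bs ih =>
    rw [List.cons_append, pv_J_cons b (by simp [h]), ih]
    simp

theorem pv_scanSegs_acc : ∀ (segs : List (List Char)) (d : Int) (frags : List (List Char)),
    pvScanSegs segs d frags =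
      (frags ++ (pvScanSegs segs d []).1, (pvScanSegs segs d []).2) := by
  intro segs
  induction segs with
  | nil => intro d frags; simp [pvScanSegs]
  | cons seg rest ih =>
    intro d frags
    rw [pvScanSegs, pvScanSegs]
    rcases hs : pvScanSeg seg d with ⟨o, d'⟩
    cases o with
    | some pre => simp
    | none =>
      simp only []
      rw [ih d' (frags ++ [seg]), ih d' ([] ++ [seg])]
      simp

theorem pv_scanSegs_true_ne_nil : ∀ (segs : List (List Char)) (d : Int) (frs : List (List Char)),
    pvScanSegs segs d [] = (frs, true) → frs ≠ [] := by
  intro segs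
  induction segs with
  | nil => intro d frs h; simp [pvScanSegs] at h
  | cons seg rest ih =>
    intro d frs h
    rw [pvScanSegs] at h
    rcases hs : pvScanSeg seg d with ⟨o, d'⟩
    rw [hs] at h
    cases o with
    | some pre => simp at h; subst h; simp
    | none =>
      simp only [] at h
      rw [pv_scanSegs_acc] at h
      rcases hr : pvScanSegs rest d' [] with ⟨frs', b⟩
      rw [hr] at h
      simp at h
      simp [← h.1]

theorem pv_nl_notbrace : ('\n' : Char) ≠ '{' ∧ ('\n' : Char) ≠ '}' := by decide

theorem pv_scanSegs_closed : ∀ (segs : List (List Char)) (d : Int) (pre : List Char),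
    (pvScanSeg (PySem.Chars.join ['\n'] segs) d).1 = some pre →
    ∃ frs, pvScanSegs segs d [] = (frs, true) ∧ PySem.Chars.join ['\n'] frs = pre := by
  intro segs
  induction segs with
  | nil => intro d pre h; simp [PySem.Chars.join, List.intercalate, pvScanSeg] at h
  | cons seg rest ih =>
    intro d pre h
    by_cases hne : rest = []
    · subst hne
      rw [pv_J_single] at h
      rw [pvScanSegs]
      rcases hs : pvScanSeg seg d with ⟨o, d'⟩
      rw [hs] at h
      cases o with
      | some p =>
        simp only [] at h
        refine ⟨[p], by simp, ?_⟩
        rw [pv_J_single, ← Option.some_inj, ← h]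
      | none => simp at h
    · rw [pv_J_cons seg hne, pv_scanSeg_append] at h
      rw [pvScanSegs]
      rcases hs : pvScanSeg seg d with ⟨o, d'⟩
      rw [hs] at h
      cases o with
      | some p =>
        simp only [] at h
        refine ⟨[p], by simp, ?_⟩
        rw [pv_J_single, ← Option.some_inj, ← h]
      | none =>
        simp only [] at h
        rw [pvScanSeg_cons_other pv_nl_notbrace.1 pv_nl_notbrace.2] at h
        simp only [Option.map_map] at h
        rcases ho : (pvScanSeg (PySem.Chars.join ['\n'] rest) d').1 with _ | q
        · rw [ho] at h; simp at h
        · rw [ho] at h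
          simp only [Option.map_some, Option.some_inj, Function.comp_apply] at h
          obtain ⟨frs, hfrs, hJ⟩ := ih d' q ho
          have hfne : frs ≠ [] := pv_scanSegs_true_ne_nil rest d' frs hfrs
          refine ⟨seg :: frs, ?_, ?_⟩
          · show pvScanSegs rest d' ([] ++ [seg]) = _
            rw [pv_scanSegs_acc, hfrs]; simp
          · rw [pv_J_cons seg hfne, hJ, ← h]

theorem pv_scanSegs_open : ∀ (segs : List (List Char)) (d : Int),
    (pvScanSeg (PySem.Chars.join ['\n'] segs) d).1 = none →
    pvScanSegs segs d [] = (segs, false) := by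
  intro segs
  induction segs with
  | nil => intro d h; simp [pvScanSegs]
  | cons seg rest ih =>
    intro d h
    by_cases hne : rest = []
    · subst hne
      rw [pv_J_single] at h
      rw [pvScanSegs]
      rcases hs : pvScanSeg seg d with ⟨o, d'⟩
      rw [hs] at h
      cases o with
      | some p => simp at h
      | none => simp only []; rw [pv_scanSegs_acc]; simp [pvScanSegs]
    · rw [pv_J_cons seg hne, pv_scanSeg_append] at h
      rw [pvScanSegs]
      rcases hs : pvScanSeg seg d with ⟨o, d'⟩
      rw [hs] at h
      cases o with
      | some p => simp at h
      | none =>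
        simp only [] at h
        rw [pvScanSeg_cons_other pv_nl_notbrace.1 pv_nl_notbrace.2] at h
        simp only [Option.map_map, Option.map_eq_none_iff] at h
        show pvScanSegs rest d' ([] ++ [seg]) = _
        rw [pv_scanSegs_acc, ih d' (by rw [h])]
        simp

theorem pv_brace_toList : ("{" : String).toList = ['{'] := rfl

theorem pv_singleton_infix {c : Char} {S : List Char} : [c] <:+: S ↔ c ∈ S := by
  constructor
  · intro h; exact h.mem (by simp)
  · intro h
    obtain ⟨s, t, rfl⟩ := List.mem_iff_append.1 h
    exact ⟨s, t, by simp⟩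

theorem pv_notmem_of_find_eq {l : String} (h : PySem.Str.find l "{" = -1) : '{' ∉ l.toList := by
  rw [PySem.Str.find_eq, pv_brace_toList] at h
  intro hm
  exact (PySem.Chars.find_eq_neg_one_iff l.toList ['{']).1 h (pv_singleton_infix.2 hm)

theorem pv_findOpen_none : ∀ (rest : List String), pvFindOpen rest = none →
    ∀ l ∈ rest, '{' ∉ l.toList := by
  intro rest
  induction rest with
  | nil => intro _ l hl; simp at hl
  | cons x ls ih =>
    intro h l hl
    rw [pvFindOpen] at h
    by_cases hc : PySem.Str.find x "{" = -1
    · rw [if_pos hc] at h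
      simp only [Option.map_eq_none_iff] at h
      rcases List.mem_cons.1 hl with rfl | hmem
      · exact pv_notmem_of_find_eq hc
      · exact ih h l hmem
    · rw [if_neg hc] at h; simp at h

theorem pv_findOpen_some : ∀ (rest : List String) (before : List String) (l : String) (col : Int),
    pvFindOpen rest = some (before, l, col) →
    rest = before ++ l :: rest.drop (before.length + 1) ∧
    (∀ b ∈ before, '{' ∉ b.toList) ∧
    col = PySem.Chars.find l.toList ['{'] ∧ col ≠ -1 := by
  intro rest
  induction rest with
  | nil => intro before l col h; simp [pvFindOpen] at h
  | cons x ls ih =>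
    intro before l col h
    rw [pvFindOpen] at h
    by_cases hc : PySem.Str.find x "{" = -1
    · rw [if_pos hc] at h
      simp only [Option.map_eq_some_iff] at h
      obtain ⟨⟨b', l', col'⟩, hb, heq⟩ := h
      simp only [Prod.mk.injEq] at heq
      obtain ⟨hb1, hl1, hc1⟩ := heq
      obtain ⟨hd, hnb, hcol, hne⟩ := ih b' l' col' hb
      subst hb1; subst hl1; subst hc1
      refine ⟨?_, ?_, hcol, hne⟩
      · simp only [List.length_cons, List.cons_append]
        rw [List.drop_succ_cons]
        have : ls.drop (b'.length + 1) = ls.drop (b'.length + 1) := rfl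
        calc x :: ls = x :: (b' ++ l' :: ls.drop (b'.length + 1)) := by rw [← hd]
          _ = x :: b' ++ l' :: (x :: ls).drop (b'.length + 1 + 1) := by
              simp [List.drop_succ_cons]
      · intro b hbmem
        rcases List.mem_cons.1 hbmem with rfl | hmem
        · exact pv_notmem_of_find_eq hc
        · exact hnb b hmem
    · rw [if_neg hc] at h
      simp only [Option.some_inj, Prod.mk.injEq] at h
      obtain ⟨h1, h2, h3⟩ := h
      subst h1; subst h2; subst h3
      refine ⟨by simp, by simp, ?_, hc⟩
      rw [PySem.Str.find_eq, pv_brace_toList]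

theorem pv_notmem_join {parts : List (List Char)} (h : ∀ x ∈ parts, '{' ∉ x) :
    '{' ∉ PySem.Chars.join ['\n'] parts := by
  induction parts with
  | nil => simp [PySem.Chars.join, List.intercalate]
  | cons x t ih =>
    by_cases hne : t = []
    · subst hne; rw [pv_J_single]; exact h x (by simp)
    · rw [pv_J_cons x hne]
      intro hm
      rcases List.mem_append.1 hm with hm | hm
      · exact h x (by simp) hm
      · rcases List.mem_cons.1 hm with hm | hm
        · exact absurd hm (by decide)
        · exact ih (fun y hy => h y (by simp [hy])) hm

theorem pv_A_eq (lines : List String) (start_index : Int) :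
    extract_rust_block_body_py lines start_index =
      pvRef (PySem.Str.join "\n" (PySem.List.slice lines (some start_index) none)).toList
        ((lines.length : Int) - start_index) := by
  simp only [extract_rust_block_body_py, pvRef]
  set source := PySem.Str.join "\n" (PySem.List.slice lines (some start_index) none) with hsource
  set src := source.toList with hsrc
  have hfind : PySem.Str.find source "{" = PySem.Chars.find src ['{'] := by
    rw [PySem.Str.find_eq, pv_brace_toList]
  rw [hfind]
  set n := PySem.Chars.find src ['{'] with hn
  by_cases hneg : n = -1
  · rw [if_pos hneg, if_pos hneg]
  · rw [if_neg hneg, if_neg hneg]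
    have h0 : 0 ≤ n := by have := PySem.Chars.neg_one_le_find src ['{']; omega
    obtain ⟨hp, hmin⟩ := PySem.Chars.find_spec (hn ▸ h0)
    set nn := n.toNat with hnn
    clear_value nn n src source
    have hlt : nn < src.length := by
      by_contra hge
      rw [List.drop_eq_nil_of_le (by omega)] at hp
      simp at hp
    have hbrace : src[nn] = '{' := (pv_single_pre hlt).1 hp
    have hstep : pvLoopA src 0 nn = (pvScanSeg (src.drop (nn+1)) 1).1.map (fun pre => (nn+1) + pre.length) := by
      rw [pvLoopA, dif_pos hlt, if_pos hbrace]
      rw [pv_loopA_eq]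
      norm_num
    rw [hstep]
    rcases ho : (pvScanSeg (src.drop (nn+1)) 1).1 with _ | pre
    · simp only [Option.map_none]
      rw [PySem.Chars.slice_eq_listSlice, PySem.List.slice_from src (by omega : (0:Int) ≤ n + 1)]
      rw [show (n+1).toNat = nn + 1 by omega]
    · simp only [Option.map_some]
      obtain ⟨r, hr⟩ := pv_scanSeg_found _ _ _ ho
      have hsplit : src = src.take nn ++ '{' :: (pre ++ '}' :: r) := by
        conv_lhs => rw [← List.take_append_drop nn src]
        rw [List.drop_eq_getElem_cons hlt, hbrace, hr]
      have hlen0 : (src.take nn).length = nn := by simp [List.length_take]; omega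
      rw [Prod.mk.injEq]
      refine ⟨?_, ?_⟩
      · -- body strings equal
        congr 1
        rw [PySem.Chars.slice_eq_listSlice]
        rw [show (n+1) = ((nn+1 : Nat) : Int) by omega]
        rw [show ((nn + 1 + pre.length : Nat) : Int) = ((nn+1+pre.length : Nat) : Int) by push_cast; ring]
        rw [PySem.List.slice_natCast src (nn+1) (nn+1+pre.length)]
        rw [show nn+1+pre.length - (nn+1) = pre.length by omega]
        rw [hr]
        rw [show List.take pre.length (pre ++ '}' :: r) = pre from List.take_left]
      · -- consumed counts equal
        rw [PySem.Chars.slice_eq_listSlice, PySem.List.slice_to src (by positivity : (0:Int) ≤ (nn+1+pre.length : Nat) + 1)]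
        rw [show (((nn + 1 + pre.length : Nat) : Int) + 1).toNat = nn + (pre.length + 2) by omega]
        rw [pv_count_char]
        have htake : src.take (nn + (pre.length + 2)) = src.take nn ++ '{' :: (pre ++ ['}']) := by
          conv_lhs => rw [hsplit]
          rw [List.take_append, List.take_of_length_le (by rw [hlen0]; omega), hlen0]
          congr 1
          rw [show nn + (pre.length + 2) - nn = pre.length + 1 + 1 by omega]
          rw [List.take_succ_cons]
          congr 1
          rw [List.take_append, List.take_of_length_le (by omega : pre.length ≤ pre.length + 1)]
          rw [show pre.length + 1 - pre.length = 1 by omega]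
          simp
        rw [htake]
        rw [List.count_append, List.count_cons, List.count_append, List.count_cons, List.count_nil]
        push_cast
        omega

theorem pv_nl_toList : ("\n" : String).toList = ['\n'] := rfl

theorem pv_fold_nl : ∀ (before : List String) (a : Int),
    before.foldl (fun a b => a + (PySem.Str.count b "\n" : Int) + 1) a =
      a + (((before.map (fun b => b.toList ++ ['\n'])).flatten).count '\n' : Int) := by
  intro before
  induction before with
  | nil => intro a; simp
  | cons x t ih =>
    intro a
    rw [List.foldl_cons, ih]
    rw [PySem.Str.count_eq, pv_nl_toList, pv_count_char]
    simp [List.count_append]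
    ring

theorem pv_B_eq (lines : List String) (start_index : Int) :
    extract_rust_block_body_py_alt lines start_index =
      pvRef (PySem.Str.join "\n" (PySem.List.slice lines (some start_index) none)).toList
        ((lines.length : Int) - start_index) := by
  simp only [extract_rust_block_body_py_alt, pvRef]
  set rest := PySem.List.slice lines (some start_index) none with hrest
  set S := (PySem.Str.join "\n" rest).toList with hS0
  have hS : S = PySem.Chars.join ['\n'] (rest.map String.toList) := by
    rw [hS0, PySem.Str.toList_join, pv_nl_toList]
  clear_value rest S
  rcases hfo : pvFindOpen rest with _ | ⟨before, l, col⟩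
  · have hnone := pv_findOpen_none rest hfo
    have hnm : '{' ∉ S := by
      rw [hS]
      apply pv_notmem_join
      intro x hx
      obtain ⟨y, hy, rfl⟩ := List.mem_map.1 hx
      exact hnone y hy
    rw [pv_find_char_notmem hnm]
    simp
  · dsimp only
    obtain ⟨hdecomp, hnb, hcol, hcolne⟩ := pv_findOpen_some rest before l col hfo
    set after := rest.drop (before.length + 1) with hafter
    have h0col : 0 ≤ col := by
      have := PySem.Chars.neg_one_le_find l.toList ['{']
      omega
    have hfl : 0 ≤ PySem.Chars.find l.toList ['{'] := by omega
    obtain ⟨hp, hmin⟩ := PySem.Chars.find_spec hfl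
    set col' := col.toNat with hcol'
    have hcolcast : (PySem.Chars.find l.toList ['{']).toNat = col' := by omega
    rw [hcolcast] at hp hmin
    have hcl : col' < l.toList.length := by
      by_contra hge
      rw [List.drop_eq_nil_of_le (by omega)] at hp
      simp at hp
    have hbl : l.toList[col'] = '{' := (pv_single_pre hcl).1 hp
    -- decompose S
    set JB := ((before.map (fun b => b.toList ++ ['\n']))).flatten with hJB
    have hJBfree : '{' ∉ JB := by
      rw [hJB]
      intro hm
      simp only [List.mem_flatten, List.mem_map] at hm
      obtain ⟨chunk, ⟨b, hb, rfl⟩, hmem⟩ := hm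
      rcases List.mem_append.1 hmem with hmem | hmem
      · exact hnb b hb hmem
      · simp at hmem
    set seg0 := l.toList.drop (col' + 1) with hseg0
    obtain ⟨tail, hK, hseg⟩ :
        ∃ tail, PySem.Chars.join ['\n'] (l.toList :: after.map String.toList) = l.toList ++ tail ∧
          PySem.Chars.join ['\n'] (seg0 :: after.map String.toList) = seg0 ++ tail := by
      rcases hft : after.map String.toList with _ | ⟨a, t⟩
      · exact ⟨[], by rw [pv_J_single]; simp, by rw [pv_J_single]; simp⟩
      · refine ⟨'\n' :: PySem.Chars.join ['\n'] (a :: t), ?_, ?_⟩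
        · rw [pv_J_cons _ (by simp)]
        · rw [pv_J_cons _ (by simp)]
    have hSdec : S = JB ++ l.toList ++ tail := by
      rw [hS]
      conv_lhs => rw [hdecomp]
      rw [List.map_append, List.map_cons, pv_J_decomp _ (by simp : l.toList :: after.map String.toList ≠ [])]
      rw [hK, List.append_assoc]
      congr 1
      rw [hJB, List.map_map]
      rfl
    have hll : l.length = l.toList.length := by simp
    set n := JB.length + col' with hn
    have hlt : n < S.length := by
      rw [hSdec]
      simp only [List.length_append]
      rw [← hll] at hcl ⊢
      omega
    have hfindS : PySem.Chars.find S ['{'] = (n : Int) := by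
      apply pv_find_char_eq hlt
      · rw [List.getElem_of_eq hSdec]
        rw [List.getElem_append_left (by simp only [List.length_append]; omega : n < (JB ++ l.toList).length)]
        rw [List.getElem_append_right (by omega : JB.length ≤ n)]
        have harith : n - JB.length = col' := by omega
        simp only [harith]
        exact hbl
      · intro i hi hiS
        rw [List.getElem_of_eq hSdec]
        by_cases hiJB : i < JB.length
        · rw [List.getElem_append_left (by simp only [List.length_append]; omega : i < (JB ++ l.toList).length)]
          rw [List.getElem_append_left hiJB]
          intro heq
          exact hJBfree (heq ▸ List.getElem_mem _)
        · rw [List.getElem_append_left (by simp only [List.length_append]; omega : i < (JB ++ l.toList).length)]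
          rw [List.getElem_append_right (by omega : JB.length ≤ i)]
          have hi' : i - JB.length < col' := by omega
          have hi'l : i - JB.length < l.toList.length := by omega
          intro heq
          exact absurd ((pv_single_pre hi'l).2 heq) (hmin (i - JB.length) hi')
    rw [hfindS]
    rw [if_neg (by omega : ¬ ((n : Int) = -1))]
    have hnn : ((n : Int)).toNat = n := by omega
    rw [hnn]
    -- align B's pieces with S
    have hseg0eq : PySem.Chars.slice l.toList (some (col + 1)) none = seg0 := by
      rw [PySem.Chars.slice_eq_listSlice, PySem.List.slice_from l.toList (by omega : (0:Int) ≤ col + 1)]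
      rw [show (col + 1).toNat = col' + 1 by omega, hseg0]
    have haftereq : PySem.List.slice rest (some ((before.length : Int) + 1)) none = after := by
      rw [PySem.List.slice_from rest (by omega : (0:Int) ≤ (before.length : Int) + 1)]
      rw [show ((before.length : Int) + 1).toNat = before.length + 1 by omega, hafter]
    have hdropS : S.drop (n + 1) = PySem.Chars.join ['\n'] (seg0 :: after.map String.toList) := by
      rw [hSdec, List.append_assoc, List.drop_append]
      rw [List.drop_eq_nil_of_le (by omega : JB.length ≤ n + 1), List.nil_append]
      rw [show n + 1 - JB.length = col' + 1 by omega]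
      rw [List.drop_append]
      rw [show col' + 1 - l.toList.length = 0 by omega, List.drop_zero]
      rw [hseg, hseg0]
    have htakeS : S.take n = JB ++ l.toList.take col' := by
      rw [hSdec, List.append_assoc, List.take_append]
      rw [List.take_of_length_le (by omega : JB.length ≤ n)]
      congr 1
      rw [show n - JB.length = col' by omega]
      rw [List.take_append]
      rw [show col' - l.toList.length = 0 by omega, List.take_zero, List.append_nil]
    have hnl0 : before.foldl (fun a b => a + (PySem.Str.count b "\n" : Int) + 1) 0 =
        (JB.count '\n' : Int) := by
      rw [pv_fold_nl, hJB]
      simp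
    have hnlcol : (PySem.Chars.count (PySem.Chars.slice l.toList none (some col)) ['\n'] : Int) =
        ((l.toList.take col').count '\n' : Int) := by
      rw [PySem.Chars.slice_eq_listSlice, PySem.List.slice_to l.toList h0col, pv_count_char]
    rw [hseg0eq, haftereq, hdropS, hnl0, hnlcol]
    rcases hscan : (pvScanSeg (PySem.Chars.join ['\n'] (seg0 :: after.map String.toList)) 1).1 with _ | pre
    · rw [pv_scanSegs_open _ _ hscan]
      simp
    · obtain ⟨frs, hfrs, hJfrs⟩ := pv_scanSegs_closed _ _ _ hscan
      rw [hfrs]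
      simp only [if_pos]
      rw [hJfrs]
      rw [Prod.mk.injEq]
      refine ⟨rfl, ?_⟩
      rw [htakeS, List.count_append, pv_count_char]
      push_cast
      ring

-- ===== VERDICT (by name: the statement is the Claim_ definition above) =====
theorem extract_rust_block_body_py_spec : Claim_equal_extract_rust_block_body_py := by
  intro lines start_index _
  unfold Spec_extract_rust_block_body_py
  rw [pv_A_eq, pv_B_eq]
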